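-- pv_equiv track=rewrite | github.com/hehepig4/saturn | source/evaluation/runners/primitive_class_ablation.py | find_gt_rank
-- ===== SOURCE A (Python) =====
-- from typing import Dict, Any, List, Optional, Tuple
--
-- def find_gt_rank(results: List[Tuple[str, float]], gt_tables: List[str]) -> Optional[int]:
--     """Find the best (minimum) rank among all ground truth tables (1-indexed)."""
--     result_ids = [tid for tid, _ in results]
--     best_rank = None
--     for gt in gt_tables:
--         try:
--             rank = result_ids.index(gt) + 1
--             if best_rank is None or rank < best_rank:
--                 best_rank = rank
--         except ValueError:
--             continue
--     return best_rank
-- ===== SOURCE B (Python) =====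
-- from typing import Dict, Any, List, Optional, Tuple
--
-- def find_gt_rank(results: List[Tuple[str, float]], gt_tables: List[str]) -> Optional[int]:
--     """Find the best (minimum) rank among all ground truth tables (1-indexed)."""
--     gt = set(gt_tables)
--     for i, (tid, _) in enumerate(results):
--         if tid in gt:
--             return i + 1
--     return None
-- ===== Notes on version B (the rewrite author's own statement) =====
-- stated objective: faster
-- what changed: Instead of scanning result_ids once per ground-truth table with list.index and maintaining a running minimum, B builds a set of ground-truth tables and makes one early-exit forward pass over results, returning the first matching position (which equals the minimum rank).
import Mathlib
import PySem

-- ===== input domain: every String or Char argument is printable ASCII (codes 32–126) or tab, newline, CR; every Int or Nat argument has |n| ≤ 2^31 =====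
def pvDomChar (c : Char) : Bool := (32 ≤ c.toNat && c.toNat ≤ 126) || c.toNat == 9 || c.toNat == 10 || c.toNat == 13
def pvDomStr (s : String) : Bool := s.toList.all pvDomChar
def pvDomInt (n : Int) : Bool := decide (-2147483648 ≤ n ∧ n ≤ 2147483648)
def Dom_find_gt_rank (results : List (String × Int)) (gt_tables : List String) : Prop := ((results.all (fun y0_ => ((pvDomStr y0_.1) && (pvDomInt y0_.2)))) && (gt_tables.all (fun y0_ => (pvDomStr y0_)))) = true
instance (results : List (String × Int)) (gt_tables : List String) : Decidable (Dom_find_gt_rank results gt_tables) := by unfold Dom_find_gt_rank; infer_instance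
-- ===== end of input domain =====

-- B replaces A's per-gt-table list.index scans with a minimum update by one early-exit
-- forward pass over results against a prebuilt set of ground-truth tables (objective: faster).

-- ===== PORT A =====
-- the body of A's for-loop over gt_tables (try/except ValueError = the none branch of index?)
def pvAStep (result_ids : List String) (best : Option Int) (g : String) : Option Int :=
  match PySem.List.index? result_ids g with
  | none => best            -- ValueError: continue
  | some i =>
    let rank : Int := (i : Int) + 1
    match best with
    | none => some rank
    | some b => if rank < b then some rank else some b

def find_gt_rank (results : List (String × Int)) (gt_tables : List String) : Option Int :=
  let result_ids := results.map (fun p => p.1)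
  gt_tables.foldl (pvAStep result_ids) none

-- ===== PORT B =====
-- 'for i, (tid, _) in enumerate(results): if tid in gt: return i + 1'
def pvBGo (gt : PySem.Set String) : List (String × Int) → Nat → Option Int
  | [], _ => none
  | (tid, _) :: rest, i =>
    if PySem.Set.contains gt tid then some ((i : Int) + 1) else pvBGo gt rest (i + 1)

def find_gt_rank_alt (results : List (String × Int)) (gt_tables : List String) : Option Int :=
  pvBGo (PySem.Set.ofList gt_tables) results 0

-- ===== PRECONDITION & SPEC =====
def Spec_find_gt_rank (results : List (String × Int)) (gt_tables : List String) (out : Option Int) : Prop := out = find_gt_rank_alt results gt_tables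
instance (results : List (String × Int)) (gt_tables : List String) (out : Option Int) : Decidable (Spec_find_gt_rank results gt_tables out) := by unfold Spec_find_gt_rank; infer_instance

-- ===== CLAIM (what is proved, stated in full; the proofs are below) =====
def Claim_equal_find_gt_rank : Prop := ∀ (results : List (String × Int)) (gt_tables : List String), Dom_find_gt_rank results gt_tables → Spec_find_gt_rank results gt_tables (find_gt_rank results gt_tables)

-- ===== LEMMAS AND PROOFS =====

-- A's running-minimum update, as a binary operation
def pvOptMin : Option Int → Option Int → Option Int
  | b, none => b
  | none, some r => some r
  | some b, some r => if r < b then some r else some b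

-- the rank A would record for one ground-truth table
def pvRank1 (ids : List String) (g : String) : Option Int :=
  (PySem.List.index? ids g).map (fun i => (i : Int) + 1)

-- the first-match rank (the common reference shape of both programs)
def pvF (gt : List String) : List (String × Int) → Option Int
  | [] => none
  | (tid, _) :: r => if tid ∈ gt then some 1 else (pvF gt r).map (· + 1)

theorem pvOptMin_assoc (a b c : Option Int) :
    pvOptMin (pvOptMin a b) c = pvOptMin a (pvOptMin b c) := by
  cases a <;> cases b <;> cases c <;> simp only [pvOptMin] <;> split_ifs <;>
    simp only [pvOptMin] <;> split_ifs <;> simp only [Option.some.injEq] <;>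
      first | rfl | omega

theorem pvOptMin_none_left (x : Option Int) : pvOptMin none x = x := by
  cases x <;> rfl

theorem pvAStep_eq (ids : List String) (best : Option Int) (g : String) :
    pvAStep ids best g = pvOptMin best (pvRank1 ids g) := by
  cases h : PySem.List.index? ids g <;> cases best <;>
    simp only [pvAStep, pvRank1, pvOptMin, h] <;> rfl

theorem foldl_pvAStep (ids : List String) (gt : List String) (best : Option Int) :
    gt.foldl (pvAStep ids) best = pvOptMin best (gt.foldl (pvAStep ids) none) := by
  induction gt generalizing best with
  | nil => cases best <;> simp [pvOptMin]
  | cons g gt ih =>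
    simp only [List.foldl_cons]
    rw [ih, ih (pvAStep ids none g), pvAStep_eq, pvAStep_eq, pvOptMin_assoc,
      pvOptMin_none_left]

theorem pvA0_cons (ids : List String) (g : String) (gt : List String) :
    (g :: gt).foldl (pvAStep ids) none
      = pvOptMin (pvRank1 ids g) (gt.foldl (pvAStep ids) none) := by
  simp only [List.foldl_cons]
  rw [foldl_pvAStep, pvAStep_eq, pvOptMin_none_left]

theorem pvRank1_pos (ids : List String) (g : String) (v : Int)
    (h : pvRank1 ids g = some v) : 1 ≤ v := by
  unfold pvRank1 at h
  cases hi : PySem.List.index? ids g with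
  | none => rw [hi] at h; simp at h
  | some i => rw [hi] at h; simp at h; omega

theorem pvA0_pos (ids : List String) (gt : List String) (v : Int)
    (h : gt.foldl (pvAStep ids) none = some v) : 1 ≤ v := by
  induction gt generalizing v with
  | nil => simp at h
  | cons g gt ih =>
    rw [pvA0_cons] at h
    cases hr : pvRank1 ids g with
    | none =>
      rw [hr] at h
      cases ht : gt.foldl (pvAStep ids) none with
      | none => rw [ht] at h; simp [pvOptMin] at h
      | some w => rw [ht] at h; simp [pvOptMin] at h; exact h ▸ ih w ht
    | some r =>
      rw [hr] at h
      cases ht : gt.foldl (pvAStep ids) none with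
      | none =>
        rw [ht] at h; simp [pvOptMin] at h
        have := pvRank1_pos ids g r hr; omega
      | some w =>
        rw [ht] at h; simp [pvOptMin] at h
        have h1 := pvRank1_pos ids g r hr
        have h2 := ih w ht
        split_ifs at h <;> simp at h <;> omega

theorem pvA0_gen (x : String) (rest : List String) (gt : List String) :
    gt.foldl (pvAStep (x :: rest)) none
      = if x ∈ gt then some 1
        else (gt.foldl (pvAStep rest) none).map (· + 1) := by
  induction gt with
  | nil => simp
  | cons g gt ih =>
    rw [pvA0_cons, ih, pvA0_cons]
    by_cases hgx : g = x
    · subst hgx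
      simp only [List.mem_cons, true_or, if_pos]
      have hr : pvRank1 (g :: rest) g = some 1 := by
        unfold pvRank1
        rw [PySem.List.index?_cons_self]
        rfl
      rw [hr]
      by_cases hmem : g ∈ gt
      · rw [if_pos hmem]
        simp [pvOptMin]
      · rw [if_neg hmem]
        cases ht : gt.foldl (pvAStep rest) none with
        | none => simp [pvOptMin]
        | some w =>
          have hw := pvA0_pos rest gt w ht
          simp [pvOptMin]
          omega
    · have hr : pvRank1 (x :: rest) g = (pvRank1 rest g).map (· + 1) := by
        unfold pvRank1
        rw [PySem.List.index?_cons_of_ne rest (Ne.symm hgx)]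
        cases PySem.List.index? rest g with
        | none => rfl
        | some i => simp
      rw [hr]
      by_cases hxm : x ∈ gt
      · rw [if_pos hxm, if_pos (by simp [hxm])]
        cases hq : pvRank1 rest g with
        | none => simp [pvOptMin]
        | some r =>
          have := pvRank1_pos rest g r hq
          simp [pvOptMin]
          omega
      · rw [if_neg hxm, if_neg (by simp [hxm, Ne.symm hgx] )]
        cases hq : pvRank1 rest g <;>
          cases ht : gt.foldl (pvAStep rest) none <;>
            simp [pvOptMin] <;> split_ifs <;> simp_all

theorem pvA0_eq_pvF (results : List (String × Int)) (gt : List String) :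
    gt.foldl (pvAStep (results.map (fun p => p.1))) none = pvF gt results := by
  induction results with
  | nil =>
    induction gt with
    | nil => rfl
    | cons g gt ih =>
      rw [pvA0_cons, ih]
      have hn : pvRank1 [] g = none := by
        simp [pvRank1]
      simp only [List.map_nil]
      rw [hn]
      rfl
  | cons p r ih =>
    obtain ⟨tid, v⟩ := p
    simp only [List.map_cons]
    rw [pvA0_gen, ih]
    simp [pvF]

theorem pvBGo_eq_pvF (gt : List String) (results : List (String × Int)) (k : Nat) :
    pvBGo (PySem.Set.ofList gt) results k = (pvF gt results).map (· + (k : Int)) := by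
  induction results generalizing k with
  | nil => simp [pvBGo, pvF]
  | cons p r ih =>
    obtain ⟨tid, v⟩ := p
    by_cases hm : tid ∈ gt
    · have hc : PySem.Set.contains (PySem.Set.ofList gt) tid = true := by
        simp [PySem.Set.mem_ofList, hm]
      simp [pvBGo, pvF, hm]
      omega
    · have hc : PySem.Set.contains (PySem.Set.ofList gt) tid = false := by
        simp [PySem.Set.mem_ofList, hm]
      simp only [pvBGo, pvF, hc, Bool.false_eq_true, if_false, hm]
      rw [ih]
      cases pvF gt r with
      | none => rfl
      | some v => simp; ring

-- ===== VERDICT (by name: the statement is the Claim_ definition above) =====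
theorem find_gt_rank_spec : Claim_equal_find_gt_rank := by
  intro results gt _
  unfold Spec_find_gt_rank find_gt_rank find_gt_rank_alt
  rw [pvBGo_eq_pvF]
  simp only [Nat.cast_zero]
  rw [pvA0_eq_pvF]
  cases pvF gt results <;> simp
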